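-- pv_equiv track=rewrite | github.com/Gary9409/Algorithm | 2개_이하로_다른_비트.py | solution
-- ===== SOURCE A (Python) =====
-- def solution(numbers):
--     answer = []
--
--     for n in numbers:
--
-- 		# 짝수면 마지막 비트가 0이므로 1 더함
--         if n % 2 == 0:
--             answer.append(n + 1)
--             continue
--
--
-- 		# 홀수면 가장 뒤에 오는 0을 찾은 후, 0과 그 뒤 1을 교체
--         binary, digit = bin(n), 0
--
--         for bit in binary[::-1]:
--             if bit == '0' or bit == 'b':
--                 break
--             digit += 1
--
--         answer.append(n + 2 ** digit - 2 ** (digit - 1))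
--
--     return answer
-- ===== SOURCE B (Python) =====
-- def solution(numbers):
--     def flip(n):
--         if n % 2 == 0:
--             return n + 1
--         m = abs(n)
--         return n + ((m + 1) & -(m + 1)) // 2
--     return [flip(n) for n in numbers]
-- ===== Notes on version B (the rewrite author's own statement) =====
-- stated objective: faster
-- what changed: The odd branch's build-binary-string, reverse-slice and character-scan loop is replaced by the closed-form lowest-set-bit trick (m+1)&-(m+1) on abs(n), and the accumulator loop by a list comprehension over a per-element helper.
import Mathlib
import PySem

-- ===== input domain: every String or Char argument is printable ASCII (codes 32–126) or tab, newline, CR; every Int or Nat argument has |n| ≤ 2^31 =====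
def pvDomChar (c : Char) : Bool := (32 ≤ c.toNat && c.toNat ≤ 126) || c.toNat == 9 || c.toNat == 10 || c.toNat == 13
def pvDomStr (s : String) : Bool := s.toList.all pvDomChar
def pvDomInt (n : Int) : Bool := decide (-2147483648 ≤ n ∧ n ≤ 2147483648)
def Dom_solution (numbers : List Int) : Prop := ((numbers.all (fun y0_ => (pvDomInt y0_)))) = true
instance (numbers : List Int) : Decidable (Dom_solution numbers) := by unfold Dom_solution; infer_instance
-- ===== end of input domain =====

-- B replaces A's binary-string building and reversed trailing-ones scan by the lowest-set-bit trick (m+1)&-(m+1); measured constant-factor speedup (no per-element string building) — objective: faster.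

-- ===== PORT A =====
-- the inner "for bit in …: if bit == '0' or bit == 'b': break; digit += 1" loop
def scanDigit : List Char → Nat → Nat
  | [], d => d
  | c :: cs, d => if c = '0' ∨ c = 'b' then d else scanDigit cs (d + 1)

def solution (numbers : List Int) : List Int :=
  numbers.foldl
    (fun answer n =>
      if PySem.Int.mod n 2 = 0 then
        answer ++ [n + 1]
      else
        let binary := PySem.Int.pyBin n
        -- binary[::-1]: step -1 ≠ 0, so slice? is always `some`; the getD default is never used
        let rev := (PySem.Str.slice? binary none none (-1)).getD ""
        let digit := scanDigit rev.toList 0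
        -- n is odd here, so the scan counts at least the final '1' bit: digit ≥ 1, and the
        -- Nat subtraction digit - 1 agrees with Python's digit - 1 on every reachable input
        answer ++ [n + 2 ^ digit - 2 ^ (digit - 1)])
    []

-- ===== PORT B =====
def flipLowZero (n : Int) : Int :=
  if PySem.Int.mod n 2 = 0 then n + 1
  else
    let m := |n|
    n + PySem.Int.floordiv (PySem.Int.band (m + 1) (-(m + 1))) 2

def solution_alt (numbers : List Int) : List Int := numbers.map flipLowZero

-- ===== PRECONDITION & SPEC =====
def Spec_solution (numbers : List Int) (out : List Int) : Prop := out = solution_alt numbers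
instance (numbers : List Int) (out : List Int) : Decidable (Spec_solution numbers out) := by unfold Spec_solution; infer_instance

-- ===== CLAIM (what is proved, stated in full; the proofs are below) =====
def Claim_equal_solution : Prop := ∀ (numbers : List Int), Dom_solution numbers → Spec_solution numbers (solution numbers)

-- ===== LEMMAS AND PROOFS =====

-- msb-first binary digit characters of m (empty for m = 0); equals Nat.toDigits 2 m for m ≠ 0
def bitsAux (m : Nat) : List Char :=
  if h : m = 0 then [] else bitsAux (m / 2) ++ [(m % 2).digitChar]
decreasing_by exact Nat.div_lt_self (Nat.pos_of_ne_zero h) (by omega)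

-- number of trailing one bits of m
def tOnes (m : Nat) : Nat :=
  if h : m % 2 = 1 then tOnes (m / 2) + 1 else 0
decreasing_by exact Nat.div_lt_self (by omega) (by omega)

theorem and_mod_two (a b : Nat) : (a &&& b) % 2 = a % 2 * (b % 2) := by
  rcases Nat.mod_two_eq_zero_or_one a with h|h <;> rcases Nat.mod_two_eq_zero_or_one b with g|g <;>
    simp [h, g, Nat.and_mod_two_eq_one, Nat.mod_two_eq_zero_iff_testBit_zero]

theorem and_decomp (a b : Nat) :
    a &&& b = 2 * (a / 2 &&& b / 2) + a % 2 * (b % 2) := by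
  rw [← Nat.and_div_two, ← and_mod_two]; omega

-- clearing the low set bit: (m+1) - ((m+1) &&& m) is the lowest set bit 2^(trailing ones of m)
theorem lowbit_eq (m : Nat) : (m + 1) - ((m + 1) &&& m) = 2 ^ tOnes m := by
  induction m using Nat.strong_induction_on with
  | _ m ih =>
    rw [tOnes]
    rcases Nat.mod_two_eq_zero_or_one m with h|h
    · have h2 : (m + 1) / 2 = m / 2 := by omega
      have hd := and_decomp (m + 1) m
      rw [h2, Nat.and_self, h, Nat.mul_zero] at hd
      simp [h]
      omega
    · have h2 : (m + 1) / 2 = m / 2 + 1 := by omega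
      have h3 : (m + 1) % 2 = 0 := by omega
      have hd := and_decomp (m + 1) m
      rw [h2, h3, Nat.zero_mul] at hd
      have hle : (m / 2 + 1) &&& (m / 2) ≤ m / 2 + 1 := Nat.and_le_left
      have ihq := ih (m / 2) (by omega)
      simp [h, pow_succ]
      omega

theorem tOnes_pos {m : Nat} (h : m % 2 = 1) : 1 ≤ tOnes m := by
  rw [tOnes]; simp [h]

theorem toDigitsCore_eq (f : Nat) : ∀ (n : Nat) (acc : List Char), n ≠ 0 → n ≤ f →
    Nat.toDigitsCore 2 f n acc = bitsAux n ++ acc := by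
  induction f with
  | zero => intro n acc h hf; omega
  | succ f ih =>
    intro n acc h hf
    rw [Nat.toDigitsCore, bitsAux]
    simp [h]
    by_cases h2 : n ≤ 1
    · have h1 : n = 1 := by omega
      subst h1; simp [bitsAux]
    · rw [if_neg h2, ih (n / 2) _ (by omega) (by omega)]

theorem toDigits_eq {n : Nat} (h : n ≠ 0) : Nat.toDigits 2 n = bitsAux n := by
  simpa [Nat.toDigits] using toDigitsCore_eq (n + 1) n [] h (by omega)

-- the reversed-string scan counts the trailing one bits and stops no later than the 'b' of "0b"
theorem scan_bits (m : Nat) : ∀ (rest : List Char) (d : Nat),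
    scanDigit ((bitsAux m).reverse ++ 'b' :: rest) d = d + tOnes m := by
  induction m using Nat.strong_induction_on with
  | _ m ih =>
    intro rest d
    rw [bitsAux, tOnes]
    by_cases h : m = 0
    · simp [h, scanDigit]
    · rcases Nat.mod_two_eq_zero_or_one m with h2|h2 <;> simp [h, h2, scanDigit, Nat.digitChar]
      · rw [ih (m / 2) (by omega) rest (d + 1)]
        omega

-- Python's k & -k for a positive k, through PySem.Int.band's mixed-sign branch
theorem band_pos_neg (k : Nat) (hk : 1 ≤ k) :
    PySem.Int.band (↑k) (-(↑k)) = ↑(k - (k &&& (k - 1))) := by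
  rw [PySem.Int.band]
  have h1 : ¬ (0:Int) ≤ -(↑k : Int) := by omega
  simp [h1]
  intro h0; omega

-- the odd branch of A equals the odd branch of B
theorem flip_odd (n : Int) (h : ¬ PySem.Int.mod n 2 = 0) :
    n + 2 ^ (scanDigit ((PySem.Str.slice? (PySem.Int.pyBin n) none none (-1)).getD "").toList 0) -
      2 ^ ((scanDigit ((PySem.Str.slice? (PySem.Int.pyBin n) none none (-1)).getD "").toList 0) - 1)
      = flipLowZero n := by
  have hmod : PySem.Int.mod n 2 = n % 2 := PySem.Int.mod_eq_emod_of_pos (by omega)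
  have hodd : n % 2 = 1 := by omega
  have hm : n.natAbs % 2 = 1 := by omega
  have hm0 : n.natAbs ≠ 0 := by omega
  have hdig : scanDigit ((PySem.Str.slice? (PySem.Int.pyBin n) none none (-1)).getD "").toList 0
      = tOnes n.natAbs := by
    rw [PySem.Str.slice?_none_none_neg_one, Option.getD_some, String.toList_ofList,
      PySem.Int.toList_pyBin, PySem.Int.toBinChars0b]
    by_cases hn : n < 0
    · simp only [if_pos hn, toDigits_eq hm0, List.reverse_cons]
      simp only [List.append_assoc, List.cons_append, List.nil_append]
      rw [scan_bits]
      omega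
    · have hnt : n.toNat = n.natAbs := by omega
      simp only [if_neg hn, hnt, toDigits_eq hm0, List.reverse_cons]
      simp only [List.append_assoc, List.cons_append, List.nil_append]
      rw [scan_bits]
      omega
  rw [hdig]
  have habs : |n| = (↑n.natAbs : Int) := Int.abs_eq_natAbs n
  simp only [flipLowZero, if_neg h, habs]
  have hc : (↑n.natAbs : Int) + 1 = ↑(n.natAbs + 1) := by push_cast; ring
  rw [hc, band_pos_neg (n.natAbs + 1) (by omega)]
  have hsub : n.natAbs + 1 - 1 = n.natAbs := by omega
  rw [hsub, lowbit_eq]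
  have h2 : (2:Int) = ((2:Nat):Int) := by norm_cast
  rw [h2, PySem.Int.floordiv_natCast]
  obtain ⟨e, he⟩ : ∃ e, tOnes n.natAbs = e + 1 := ⟨tOnes n.natAbs - 1, by have := tOnes_pos hm; omega⟩
  rw [he]
  have hp : 2 ^ (e + 1) / 2 = 2 ^ e := by rw [pow_succ]; omega
  rw [hp]
  push_cast
  rw [pow_succ]
  ring

theorem foldl_body (numbers : List Int) : ∀ acc : List Int,
    numbers.foldl
      (fun answer n =>
        if PySem.Int.mod n 2 = 0 then
          answer ++ [n + 1]
        else
          let binary := PySem.Int.pyBin n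
          let rev := (PySem.Str.slice? binary none none (-1)).getD ""
          let digit := scanDigit rev.toList 0
          answer ++ [n + 2 ^ digit - 2 ^ (digit - 1)]) acc
      = acc ++ numbers.map flipLowZero := by
  induction numbers with
  | nil => intro acc; simp
  | cons n ns ih =>
    intro acc
    simp only [List.foldl_cons, List.map_cons, ih]
    by_cases h : PySem.Int.mod n 2 = 0
    · have hb : flipLowZero n = n + 1 := by rw [flipLowZero, if_pos h]
      rw [if_pos h, hb]
      simp
    · simp only [if_neg h, flip_odd n h]
      simp

-- ===== VERDICT (by name: the statement is the Claim_ definition above) =====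
theorem solution_spec : Claim_equal_solution := by
  intro numbers _
  unfold Spec_solution solution solution_alt
  simpa using foldl_body numbers []
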